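-- pv_equiv track=rewrite | github.com/seungh0/programmers-algorithm | 202008/20200831/change_element.py | solution
-- ===== SOURCE A (Python) =====
-- def solution(cnt, a, b):
--     a = sorted(a)
--     b = sorted(b, reverse=True)
--     for i in range(cnt):
--         if a[i] < b[i]:
--             a[i], b[i] = b[i], a[i]
--         else:
--             break
--     return sum(a)
-- ===== SOURCE B (Python) =====
-- def solution(cnt, a, b):
--     sa = sorted(a)
--     sb = sorted(b, reverse=True)
--     # sa[i] - sb[i] is non-decreasing (sa ascending, sb descending), so the
--     # beneficial pairs sa[i] < sb[i] form a prefix: binary-search its end m,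
--     # then the answer is sum(a) with sa[:m] replaced by sb[:m].
--     lo, hi = 0, min(cnt, len(sa), len(sb))
--     while lo < hi:
--         mid = (lo + hi) // 2
--         if sa[mid] < sb[mid]:
--             lo = mid + 1
--         else:
--             hi = mid
--     return sum(a) - sum(sa[:lo]) + sum(sb[:lo])
-- ===== Notes on version B (the rewrite author's own statement) =====
-- stated objective: alternative
-- what changed: B binary-searches the end of the beneficial prefix (valid because sorted-ascending a and sorted-descending b make a[i]<b[i] monotone) and returns sum(a)-sum(sa[:m])+sum(sb[:m]) in one prefix-sum formula, instead of A's linear swap-in-place loop followed by re-summing the mutated list.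
import Mathlib
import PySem

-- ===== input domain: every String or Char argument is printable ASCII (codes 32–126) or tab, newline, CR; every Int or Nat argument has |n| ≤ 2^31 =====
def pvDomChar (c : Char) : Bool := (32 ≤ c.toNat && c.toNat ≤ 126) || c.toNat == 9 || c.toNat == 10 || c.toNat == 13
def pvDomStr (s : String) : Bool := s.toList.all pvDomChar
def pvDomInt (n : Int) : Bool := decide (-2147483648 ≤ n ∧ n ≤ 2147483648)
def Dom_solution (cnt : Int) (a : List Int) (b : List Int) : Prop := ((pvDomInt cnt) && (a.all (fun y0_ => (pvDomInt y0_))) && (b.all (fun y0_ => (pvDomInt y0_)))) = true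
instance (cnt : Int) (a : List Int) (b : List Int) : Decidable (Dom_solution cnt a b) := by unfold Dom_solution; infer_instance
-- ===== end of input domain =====

-- B binary-searches the end of the beneficial prefix (sa[i] < sb[i] is monotone because sa is
-- ascending and sb descending) and answers with one prefix-sum formula, instead of A's
-- swap-in-place-then-resum linear loop; same overall cost (sorting dominates).

-- ===== PORT A =====
-- the for-loop of A: n iterations left, current index i, the two (mutated) sorted lists.
-- Python indexing a[i]/b[i] with i ≥ 0 is l[i]? (none = IndexError, excluded by Pre_;
-- on that branch the port returns the lists as they stand).
def pvLoopA (n i : Nat) (sa sb : List Int) : List Int × List Int :=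
  match n with
  | 0 => (sa, sb)
  | n + 1 =>
    match sa[i]?, sb[i]? with
    | some x, some y =>
        if x < y then pvLoopA n (i + 1) (sa.set i y) (sb.set i x) else (sa, sb)
    | _, _ => (sa, sb)

def solution (cnt : Int) (a : List Int) (b : List Int) : Int :=
  let sa := PySem.List.sorted a (fun x => x) false
  let sb := PySem.List.sorted b (fun x => x) true
  ((pvLoopA cnt.toNat 0 sa sb).1).sum

-- ===== PORT B =====
-- Source B's while-loop: binary search for the first index with sa[mid] >= sb[mid].
-- In every reachable state 0 ≤ lo ≤ mid < hi ≤ both lengths, so Python's sa[mid]/sb[mid]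
-- is plain in-range indexing ([mid.toNat]?; the none branch is unreachable) and the loop
-- terminates; fuel = initial hi bounds the iteration count ((hi-lo) shrinks each step).
def pvBS (fuel : Nat) (lo hi : Int) (sa sb : List Int) : Int :=
  match fuel with
  | 0 => lo
  | fuel + 1 =>
    if lo < hi then
      let mid := PySem.Int.floordiv (lo + hi) 2
      match sa[mid.toNat]?, sb[mid.toNat]? with
      | some x, some y =>
          if x < y then pvBS fuel (mid + 1) hi sa sb else pvBS fuel lo mid sa sb
      | _, _ => lo
    else lo

-- sum(l[:m]) with m ≥ 0 (lo never goes negative) is (l.take m.toNat).sum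
def solution_alt (cnt : Int) (a : List Int) (b : List Int) : Int :=
  let sa := PySem.List.sorted a (fun x => x) false
  let sb := PySem.List.sorted b (fun x => x) true
  let hi := min (min cnt (sa.length : Int)) (sb.length : Int)
  let lo := pvBS hi.toNat 0 hi sa sb
  a.sum - (sa.take lo.toNat).sum + (sb.take lo.toNat).sum

-- ===== PRECONDITION & SPEC =====
-- Pre_ excludes exactly the inputs on which A raises IndexError: cnt exceeds the common length
-- and every pair of the sorted lists up to that length is beneficial, so the loop never breaks.
def Pre_solution (cnt : Int) (a : List Int) (b : List Int) : Prop :=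
  cnt ≤ (min a.length b.length : Int) ∨
  ∃ j : Nat, j < min a.length b.length ∧
    ¬ ((PySem.List.sorted a (fun x => x) false)[j]! < (PySem.List.sorted b (fun x => x) true)[j]!)
instance (cnt : Int) (a : List Int) (b : List Int) : Decidable (Pre_solution cnt a b) := by
  unfold Pre_solution; infer_instance

def pvWitness_solution : Int × List Int × List Int := (2, ([1, 4], [3, 2]))

def Spec_solution (cnt : Int) (a : List Int) (b : List Int) (out : Int) : Prop := out = solution_alt cnt a b
instance (cnt : Int) (a : List Int) (b : List Int) (out : Int) : Decidable (Spec_solution cnt a b out) := by unfold Spec_solution; infer_instance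

-- ===== CLAIM (what is proved, stated in full; the proofs are below) =====
def Claim_equal_solution : Prop := ∀ (cnt : Int) (a : List Int) (b : List Int), Dom_solution cnt a b → Pre_solution cnt a b → Spec_solution cnt a b (solution cnt a b)
-- ===== LEMMAS AND PROOFS =====

-- the test A's loop makes at index i on the two sorted lists (false once an index is out of range)
def pvPred (sa sb : List Int) (i : Nat) : Bool :=
  match sa[i]?, sb[i]? with
  | some x, some y => decide (x < y)
  | _, _ => false

-- the index at which A's loop stops, starting at i with n iterations left
def pvStp (sa sb : List Int) (i n : Nat) : Nat :=
  match n with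
  | 0 => i
  | n + 1 => if pvPred sa sb i then pvStp sa sb (i + 1) n else i

-- A's loop rephrased as gain accumulation (proof-only helper)
def pvLin (n i : Nat) (sa sb : List Int) (total : Int) : Int :=
  match n with
  | 0 => total
  | n + 1 =>
    match sa[i]?, sb[i]? with
    | some x, some y =>
        if x ≥ y then total else pvLin n (i + 1) sa sb (total + (y - x))
    | _, _ => total

lemma pvStp_bounds (sa sb : List Int) : ∀ n i, i ≤ pvStp sa sb i n ∧ pvStp sa sb i n ≤ i + n := by
  intro n
  induction n with
  | zero => intro i; simp [pvStp]
  | succ n ih =>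
    intro i
    simp only [pvStp]
    split
    · have := ih (i + 1); omega
    · omega

lemma pvStp_char (sa sb : List Int) : ∀ n i m, i ≤ m → m ≤ i + n →
    (∀ j, i ≤ j → j < m → pvPred sa sb j = true) →
    (m < i + n → pvPred sa sb m = false) → pvStp sa sb i n = m := by
  intro n
  induction n with
  | zero => intro i m h1 h2 _ _; simp [pvStp]; omega
  | succ n ih =>
    intro i m h1 h2 h3 h4
    simp only [pvStp]
    rcases Nat.eq_or_lt_of_le h1 with he | h
    · have hp : pvPred sa sb i = false := by rw [he]; exact h4 (by omega)
      rw [hp]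
      simpa using he
    · have hp : pvPred sa sb i = true := h3 i le_rfl h
      rw [hp]
      simpa using ih (i + 1) m h (by omega) (fun j hj => h3 j (by omega)) (by intro hlt; exact h4 (by omega))

-- setting an index below j does not change what pvLin reads (it only reads indices ≥ j)
lemma pvLin_set_lt (n : Nat) : ∀ (j i : Nat) (sa sb : List Int) (y x t : Int), i < j →
    pvLin n j (sa.set i y) (sb.set i x) t = pvLin n j sa sb t := by
  induction n with
  | zero => intro j i sa sb y x t _; rfl
  | succ n ih =>
    intro j i sa sb y x t hij
    simp only [pvLin, List.getElem?_set_ne (by omega : i ≠ j)]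
    cases sa[j]? with
    | none => rfl
    | some xa =>
      cases sb[j]? with
      | none => rfl
      | some yb =>
        by_cases h : xa ≥ yb
        · simp [h]
        · simp only [h, if_false]
          exact ih (j + 1) i sa sb y x (t + (yb - xa)) (by omega)

-- sum after setting one position
lemma sum_set_int : ∀ (l : List Int) (i : Nat) (x y : Int), l[i]? = some x →
    (l.set i y).sum = l.sum - x + y := by
  intro l
  induction l with
  | nil => intro i x y h; simp at h
  | cons hd tl ih =>
    intro i x y h
    cases i with
    | zero => simp at h; subst h; simp [List.set]; ring
    | succ i =>
      simp only [List.getElem?_cons_succ] at h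
      simp only [List.set, List.sum_cons, ih i x y h]
      ring

-- the sum of A's mutated first list equals the accumulated total of pvLin
lemma loopA_eq_lin (n : Nat) : ∀ (i : Nat) (sa sb : List Int),
    ((pvLoopA n i sa sb).1).sum = pvLin n i sa sb sa.sum := by
  induction n with
  | zero => intro i sa sb; rfl
  | succ n ih =>
    intro i sa sb
    simp only [pvLoopA, pvLin]
    cases hx : sa[i]? with
    | none => rfl
    | some x =>
      cases hy : sb[i]? with
      | none => rfl
      | some y =>
        by_cases h : x < y
        · have h' : ¬ x ≥ y := by omega
          simp only [h, if_pos, h', if_false]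
          rw [ih (i + 1) (sa.set i y) (sb.set i x),
              pvLin_set_lt n (i + 1) i sa sb y x _ (by omega),
              sum_set_int sa i x y hx]
          ring_nf
        · have h' : x ≥ y := by omega
          simp [h, h']

-- peeling one element off a take-drop segment
lemma seg_cons (l : List Int) (i s : Nat) (x : Int) (hx : l[i]? = some x) (his : i < s) :
    (l.take s).drop i = x :: (l.take s).drop (i + 1) := by
  have hil : i < l.length := by
    have := List.getElem?_eq_some_iff.1 hx
    exact this.1
  have hlen : i < (l.take s).length := by simp [List.length_take]; omega
  rw [List.drop_eq_getElem_cons hlen]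
  congr 1
  have := List.getElem?_eq_some_iff.1 hx
  rcases this with ⟨h1, h2⟩
  simp [List.getElem_take, h2]

-- closed form of pvLin: total plus the gains up to the stop index
lemma pvLin_closed : ∀ (n i : Nat) (sa sb : List Int) (t : Int),
    pvLin n i sa sb t
      = t - ((sa.take (pvStp sa sb i n)).drop i).sum + ((sb.take (pvStp sa sb i n)).drop i).sum := by
  intro n
  induction n with
  | zero =>
    intro i sa sb t
    simp [pvLin, pvStp, List.drop_eq_nil_of_le (by simp [List.length_take] : (sa.take i).length ≤ i),
      List.drop_eq_nil_of_le (by simp [List.length_take] : (sb.take i).length ≤ i)]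
  | succ n ih =>
    intro i sa sb t
    simp only [pvLin, pvStp]
    cases hx : sa[i]? with
    | none =>
      have hp : pvPred sa sb i = false := by simp [pvPred, hx]
      simp [hp, List.drop_eq_nil_of_le (by simp [List.length_take] : (sa.take i).length ≤ i),
        List.drop_eq_nil_of_le (by simp [List.length_take] : (sb.take i).length ≤ i)]
    | some x =>
      cases hy : sb[i]? with
      | none =>
        have hp : pvPred sa sb i = false := by simp [pvPred, hx, hy]
        simp [hp, List.drop_eq_nil_of_le (by simp [List.length_take] : (sa.take i).length ≤ i),
          List.drop_eq_nil_of_le (by simp [List.length_take] : (sb.take i).length ≤ i)]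
      | some y =>
        by_cases h : x ≥ y
        · have hp : pvPred sa sb i = false := by simp [pvPred, hx, hy]; omega
          simp [h, hp, List.drop_eq_nil_of_le (by simp [List.length_take] : (sa.take i).length ≤ i),
            List.drop_eq_nil_of_le (by simp [List.length_take] : (sb.take i).length ≤ i)]
        · have hp : pvPred sa sb i = true := by simp [pvPred, hx, hy]; omega
          have hif : ¬ (x ≥ y) := h
          simp only [hif, if_false, hp, if_true]
          rw [ih (i + 1) sa sb (t + (y - x))]
          have hs : i + 1 ≤ pvStp sa sb (i + 1) n := (pvStp_bounds sa sb n (i + 1)).1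
          rw [seg_cons sa i (pvStp sa sb (i + 1) n) x hx (by omega),
              seg_cons sb i (pvStp sa sb (i + 1) n) y hy (by omega)]
          simp only [List.sum_cons]
          ring

-- binary-search characterisation: pvBS returns the first index at which the monotone
-- predicate fails (or hi0 if it never does), given the loop invariants
lemma pvBS_char (sa sb : List Int) (hi0 : Int)
    (hL : hi0 ≤ (min sa.length sb.length : Int))
    (mono : ∀ i j : Nat, i ≤ j → pvPred sa sb j = true → pvPred sa sb i = true) :
    ∀ (fuel : Nat) (lo hi : Int), 0 ≤ lo → lo ≤ hi → hi ≤ hi0 → (hi - lo).toNat ≤ fuel →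
    (∀ j : Nat, (j : Int) < lo → pvPred sa sb j = true) →
    (∀ j : Nat, hi ≤ (j : Int) → (j : Int) < hi0 → pvPred sa sb j = false) →
    0 ≤ pvBS fuel lo hi sa sb ∧ pvBS fuel lo hi sa sb ≤ hi0 ∧
    (∀ j : Nat, (j : Int) < pvBS fuel lo hi sa sb → pvPred sa sb j = true) ∧
    (pvBS fuel lo hi sa sb < hi0 → pvPred sa sb (pvBS fuel lo hi sa sb).toNat = false) := by
  intro fuel
  induction fuel with
  | zero =>
    intro lo hi h0 hlh hhh hf Hlo Hhi
    have heq : hi = lo := by omega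
    simp only [pvBS]
    refine ⟨h0, by omega, Hlo, ?_⟩
    intro hlt
    exact Hhi lo.toNat (by omega) (by omega)
  | succ fuel ih =>
    intro lo hi h0 hlh hhh hf Hlo Hhi
    simp only [pvBS]
    by_cases hcmp : lo < hi
    · simp only [hcmp, if_true]
      obtain ⟨hm1, hm2⟩ := PySem.Int.floordiv_two_mid_bounds (le_of_lt hcmp)
      have hmidlt : PySem.Int.floordiv (lo + hi) 2 < hi := by
        rw [PySem.Int.floordiv_lt_iff_lt_mul (by omega : (0:Int) < 2)]
        omega
      set mid := PySem.Int.floordiv (lo + hi) 2 with hmid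
      have hmr : (mid.toNat : Int) = mid := by omega
      have hmlen : mid.toNat < sa.length ∧ mid.toNat < sb.length := by
        constructor <;> omega
      obtain hxs : ∃ x, sa[mid.toNat]? = some x := ⟨_, List.getElem?_eq_getElem hmlen.1⟩
      obtain hys : ∃ y, sb[mid.toNat]? = some y := ⟨_, List.getElem?_eq_getElem hmlen.2⟩
      obtain ⟨x, hx⟩ := hxs
      obtain ⟨y, hy⟩ := hys
      rw [hx, hy]
      by_cases hlt : x < y
      · simp only [hlt, if_true]
        have hp : pvPred sa sb mid.toNat = true := by simp [pvPred, hx, hy, hlt]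
        exact ih (mid + 1) hi (by omega) (by omega) hhh (by omega)
          (fun j hj => mono j mid.toNat (by omega) hp) Hhi
      · simp only [hlt, if_false]
        have hp : pvPred sa sb mid.toNat = false := by simp [pvPred, hx, hy]; omega
        refine ih lo mid h0 (by omega) (by omega) (by omega) Hlo ?_
        intro j hj1 hj2
        by_cases hje : (j : Int) = mid
        · have : j = mid.toNat := by omega
          rw [this]; exact hp
        · have hmj : mid.toNat ≤ j := by omega
          by_contra hcon
          have hjt : pvPred sa sb j = true := by
            cases hc : pvPred sa sb j
            · exact absurd hc hcon
            · rfl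
          have := mono mid.toNat j hmj hjt
          rw [hp] at this
          exact Bool.false_ne_true this
    · simp only [hcmp, if_false]
      have : hi = lo := by omega
      refine ⟨h0, by omega, Hlo, ?_⟩
      intro hlt
      exact Hhi lo.toNat (by omega) (by omega)

-- monotonicity of the beneficial test on the two sorted lists
lemma pred_mono (a b : List Int) :
    ∀ i j : Nat, i ≤ j →
    pvPred (PySem.List.sorted a (fun x => x) false) (PySem.List.sorted b (fun x => x) true) j = true →
    pvPred (PySem.List.sorted a (fun x => x) false) (PySem.List.sorted b (fun x => x) true) i = true := by
  intro i j hij hj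
  set sa := PySem.List.sorted a (fun x => x) false with hsa
  set sb := PySem.List.sorted b (fun x => x) true with hsb
  unfold pvPred at hj ⊢
  cases hx : sa[j]? with
  | none => rw [hx] at hj; simp at hj
  | some x =>
    cases hy : sb[j]? with
    | none => rw [hx, hy] at hj; simp at hj
    | some y =>
      rw [hx, hy] at hj
      simp only [decide_eq_true_eq] at hj
      obtain ⟨hjla, hxa⟩ := List.getElem?_eq_some_iff.1 hx
      obtain ⟨hjlb, hyb⟩ := List.getElem?_eq_some_iff.1 hy
      have hila : i < sa.length := by omega
      have hilb : i < sb.length := by omega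
      rw [List.getElem?_eq_getElem hila, List.getElem?_eq_getElem hilb]
      simp only [decide_eq_true_eq]
      have hA : sa[i] ≤ sa[j] := by
        rcases Nat.eq_or_lt_of_le hij with rfl | h
        · exact le_refl _
        · have hp := PySem.List.sorted_pairwise a (fun x => x)
          rw [← hsa] at hp
          exact (List.pairwise_iff_getElem.1 hp) i j hila hjla h
      have hB : sb[j] ≤ sb[i] := by
        rcases Nat.eq_or_lt_of_le hij with rfl | h
        · exact le_refl _
        · have hp := PySem.List.sorted_pairwise_rev b (fun x => x)
          rw [← hsb] at hp
          exact (List.pairwise_iff_getElem.1 hp) i j hilb hjlb h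
      calc sa[i] ≤ sa[j] := hA
        _ < sb[j] := by rw [hxa, hyb]; exact hj
        _ ≤ sb[i] := hB

-- the predicate fails at the common length (one of the indexings is out of range)
lemma pred_at_len (sa sb : List Int) (j : Nat) (hj : min sa.length sb.length ≤ j) :
    pvPred sa sb j = false := by
  unfold pvPred
  rcases min_le_iff.1 hj with h | h
  · rw [List.getElem?_eq_none h]
  · rw [List.getElem?_eq_none h]
    cases sa[j]? <;> rfl

-- ===== VERDICT (by name: the statement is the Claim_ definition above) =====
theorem solution_spec : Claim_equal_solution := by
  intro cnt a b _ _
  unfold Spec_solution solution solution_alt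
  dsimp only
  set sa := PySem.List.sorted a (fun x => x) false with hsa
  set sb := PySem.List.sorted b (fun x => x) true with hsb
  set hi0 := min (min cnt (sa.length : Int)) (sb.length : Int) with hhi0
  have hL : hi0 ≤ (min sa.length sb.length : Int) := by
    rw [hhi0]
    omega
  have hsum : sa.sum = a.sum := (PySem.List.sorted_perm a (fun x => x) false).sum_eq
  by_cases hneg : 0 ≤ hi0
  case neg =>
    -- cnt < 0: A's loop makes no iteration and B's binary search has no fuel
    have hcnt : cnt < 0 := by
      rw [hhi0] at hneg; omega
    have h1 : cnt.toNat = 0 := Int.toNat_of_nonpos (by omega)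
    have h2 : hi0.toNat = 0 := Int.toNat_of_nonpos (by omega)
    rw [h1, h2]
    simp [pvLoopA, pvBS, hsum]
  have hchar := pvBS_char sa sb hi0 hL (pred_mono a b) hi0.toNat 0 hi0
    (le_refl 0) (by omega) (le_refl hi0) (by omega)
    (by intro j hj; omega)
    (by intro j h1 h2; omega)
  set r := pvBS hi0.toNat 0 hi0 sa sb with hr
  obtain ⟨hr0, hrhi, hrt, hrf⟩ := hchar
  -- A's side: loop sum = gains up to the linear stop index
  rw [loopA_eq_lin, pvLin_closed]
  simp only [List.drop_zero]
  -- the linear stop index equals the binary-search result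
  have hstp : pvStp sa sb 0 cnt.toNat = r.toNat := by
    apply pvStp_char
    · omega
    · simp only [Nat.zero_add]
      have : r ≤ cnt := by
        have : hi0 ≤ cnt := by simp only [hhi0]; omega
        omega
      omega
    · intro j _ hj
      exact hrt j (by omega)
    · intro hlt
      simp only [Nat.zero_add] at hlt
      by_cases hcase : r < hi0
      · exact hrf hcase
      · -- r = hi0 and r < cnt, hence hi0 = min of the lengths: out of range
        have hreq : r = hi0 := by omega
        have : hi0 < cnt := by omega
        have hmin : hi0 = (min sa.length sb.length : Int) := by
          simp only [hhi0] at this ⊢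
          omega
        apply pred_at_len
        omega
  rw [hstp]
  rw [hsum]
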